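/-
  THE TRANSIENT SHAPES OF THE CODEBOOK LOOP OF start_decoder (INVARIANTS §6; CONTRACTS, notes of start_decoder part C; D-18 – D-20):
  what holds of a codebook WHILE it is built, and of the books not yet visited. Producer → consumer:

      LenL mem p n         L     every byte of lengths[0 .. n) ∈ [1,31] ∪ {255}          length loops 3776 / 3786 → compute_codewords
      K7at mem p n               its upper half `≤ 31 ∨ = 255`: THE HARD PRECONDITION of compute_codewords (`available[32]`, D-18)
      usedCount / CNT      CNT   sparse: #{j < entries : lengths[j] ≠ 255} = se           3786–3824 → compute_codewords (`add_entry(…, m++, …)`)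
      longCount / CNT'     CNT′  dense: #{j < entries : 11 ≤ lengths[j] ≤ 254} = se       3818 → compute_sorted_huffman (`sorted_codewords[k++]`)
      VAL mem values se e  VAL   sparse: ∀ m < se: values[m] < entries                    compute_codewords → compute_sorted_huffman
      ZV mem sv se e       ZV    K4c as a loop invariant: ∀ x < se: 0 ≤ sv[x] < entries   FIX 7's zero fill → both store sites → K4c
      ZF mem cbs count i   ZF    every byte of cb(k), i ≤ k < count, is 0                  memset 3745 → every iteration; K4 `se = 0`, K6 type 0, DeinitOK
      Codebook.Fresh mem c       every field of a zero-filled book reads 0 / NULL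
      Codebook.K3t Blk mem c     K3 with `codewords` = the temp block of 4·se bytes of a sparse book under construction (D-20);
                                 USE: `K3t.site_codewords`, `K3t.site_lengths`; `VAL.site_lengths`
      Codebook.FHInit mem c i    the first loop of compute_accelerated_huffman; `K5b.init`, `K5b.store`: its second loop → K5
      BooksOK Blk mem f i        ∀ b < i: CodebookOK cb(b): the loop invariant of `for (i = 0; i < f->codebook_count; ++i)` (SD.4);
                                 `.zero .succ .mono .book .transfer .frame .reblk .carry`, `BooksOK.Owns`

  Each with its step lemma over an abstract store (`mem'` agrees with `mem` on the part already built, the new element has the stated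
  value) and its frame lemma. (BS, the binary-search invariant, is in Vorbis/Codebook/Basic.lean.) The SHAPE transients (`K3t`,
  `BooksOK`) are stated over the block predicate `Blk` of Vorbis/Blocks.lean; their USE lemmas return a `Site Live a n`.
  The frame lemmas `X.same` of the CONTENT transients take `Mem.EqOn lo hi mem mem'` and a no-wrap bound: from a kept block
  `hk : (Block.mk p n).Kept mem mem'` these are `hk.same`, `hk.inside`.
  At the end: the groups of this unit as Vorbis/State.lean plugs them in (`HeaderGroup.good`, `CommentsOK.good`, `CB0.good`,
  `CodebooksOK.good` : `Group.Good`; `CodebookOK.stable : Group.Stable` is in Vorbis/Codebook/Book.lean).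
-/
import Vorbis.Codebook.Book
namespace Vorbis
open X86 X86.User Asan

/-! ### L and K7: the length bytes -/

/-- **L(n)** (INVARIANTS §6): every byte of `lengths[0 .. n)` at `p` is in `[1, 31]` or is 255 (`NO_CODE`). Loop invariant of the two
length loops of start_decoder (`current_length < 32` is tested before each memset; `get_bits(5) + 1 = 32` is rejected). -/
def LenL (mem : Mem) (p n : Nat) : Prop :=
  ∀ j, j < n → (1 ≤ mem.u8 (p + j) ∧ mem.u8 (p + j) ≤ 31) ∨ mem.u8 (p + j) = 255

/-- **K7's upper half for the array passed** (D-18): every byte of `len[0 .. n)` is `≤ 31` or `= 255`. This is the HARD precondition of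
compute_codewords: `len[k]`, `len[i]` index the 32-word stack array `available` (only for bytes `≠ 255`). The lower bound 1 is
not needed (a length 0 makes the function return FALSE, safely). -/
def K7at (mem : Mem) (p n : Nat) : Prop :=
  ∀ j, j < n → mem.u8 (p + j) ≤ 31 ∨ mem.u8 (p + j) = 255

/-- L gives the precondition of compute_codewords. -/
theorem LenL.k7at {mem : Mem} {p n : Nat} (h : LenL mem p n) : K7at mem p n := by
  intro j hj
  cases h j hj with
  | inl h1 => exact Or.inl h1.2
  | inr h2 => exact Or.inr h2

/-- **USE of K7**: a used length indexes `available[32]`: the word `available[z]`, `z ≤ len[j]`, lies inside the 128-byte object. -/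
theorem K7at.index {mem : Mem} {p n : Nat} (h : K7at mem p n) (j : Nat) (hj : j < n) (hu : mem.u8 (p + j) ≠ 255) (z : Nat)
    (hz : z ≤ mem.u8 (p + j)) : 4 * z + 4 ≤ 128 := by
  cases h j hj with
  | inl h1 => omega
  | inr h2 => exact absurd h2 hu

/-- **K7** of a finished book (INVARIANTS §3.2; CONTENT, OPTIONAL: D-18): every byte of `codeword_lengths[0 .. N(c))` is in `[1, 31]` or
is 255. NOT a field of `CodebookOK`: nothing memory-relevant reads it after setup (a length is a masked shift count or a guarded
subtrahend). What matters is its upper half AT SETUP, `K7at`, for the array handed to compute_codewords. -/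
def Codebook.K7 (mem : Mem) (c : Nat) : Prop :=
  LenL mem (Codebook.codeword_lengths mem c) (Codebook.N mem c).toNat

/-- Nothing read yet. -/
theorem LenL.zero (mem : Mem) (p : Nat) : LenL mem p 0 := by
  intro j hj
  omega

/-- **Step of loop 3786** (`lengths[j] = get_bits(f, 5) + 1` or `= NO_CODE`): the bytes below `j` are kept, the new byte is a legal
length ⇒ L(j + 1). -/
theorem LenL.store {mem mem' : Mem} {p j : Nat} (h : LenL mem p j) (hs : Mem.EqOn p (p + j) mem mem') (hb : p + j ≤ 2 ^ 64)
    (hv : (1 ≤ mem'.u8 (p + j) ∧ mem'.u8 (p + j) ≤ 31) ∨ mem'.u8 (p + j) = 255) : LenL mem' p (j + 1) := by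
  intro k hk
  by_cases e : k = j
  · rw [e]
    exact hv
  · rw [hs.u8 (p + k) (by omega) (by omega) hb]
    exact h k (by omega)

/-- **Step of loop 3776** (`memset(lengths + current_entry, current_length, n)`, `1 ≤ current_length ≤ 31`): the bytes below
`cur` are kept, the `n` new bytes are `v` ⇒ L(cur + n). (`n = 0` is allowed.) -/
theorem LenL.fill {mem mem' : Mem} {p cur n v : Nat} (h : LenL mem p cur) (hs : Mem.EqOn p (p + cur) mem mem')
    (hb : p + cur ≤ 2 ^ 64) (hfill : ∀ t, t < n → mem'.u8 (p + cur + t) = v) (hv1 : 1 ≤ v) (hv2 : v ≤ 31) :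
    LenL mem' p (cur + n) := by
  intro k hk
  by_cases hlt : k < cur
  · rw [hs.u8 (p + k) (by omega) (by omega) hb]
    exact h k hlt
  · have e : p + k = p + cur + (k - cur) := by omega
    rw [e, hfill (k - cur) (by omega)]
    exact Or.inl ⟨hv1, hv2⟩

/-- **Frame of L**: a store that does not touch `lengths[0 .. n)`. -/
theorem LenL.same {mem mem' : Mem} {p n : Nat} (h : LenL mem p n) (hs : Mem.EqOn p (p + n) mem mem') (hb : p + n ≤ 2 ^ 64) :
    LenL mem' p n := by
  intro k hk
  rw [hs.u8 (p + k) (by omega) (by omega) hb]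
  exact h k hk

/-- **L survives the copy** of the sparse → dense conversion (`memcpy(c->codeword_lengths, lengths, c->entries)`, line 3803): the new
block at `q` holds the bytes of the old one at `p`. -/
theorem LenL.copy {mem mem' : Mem} {p q n : Nat} (h : LenL mem p n) (hcp : ∀ j, j < n → mem'.u8 (q + j) = mem.u8 (p + j)) :
    LenL mem' q n := by
  intro k hk
  rw [hcp k hk]
  exact h k hk

/-- A shorter prefix. -/
theorem LenL.mono {mem : Mem} {p n m : Nat} (h : LenL mem p n) (hm : m ≤ n) : LenL mem p m :=
  fun j hj => h j (by omega)

/-! ### CNT and CNT′: the two counts -/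

/-- "Entry `j` is used": `lengths[j] ≠ NO_CODE`, as the counting predicate. -/
def usedP (mem : Mem) (p : Nat) : Nat → Bool := fun j => decide (mem.u8 (p + j) ≠ 255)

/-- "Entry `j` goes into the sorted table of a dense book": `lengths[j] > 10 ∧ lengths[j] ≠ NO_CODE` (`include_in_sort`; the counting
loop 3818 tests `11 ≤ byte ≤ 254`). -/
def longP (mem : Mem) (p : Nat) : Nat → Bool := fun j => decide (11 ≤ mem.u8 (p + j) ∧ mem.u8 (p + j) ≤ 254)

/-- `total` of loop 3786: the number of used entries below `n`. -/
def usedCount (mem : Mem) (p n : Nat) : Nat := countBelow (usedP mem p) n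

/-- `sorted_count` of loop 3818: the number of long used entries below `n`. -/
def longCount (mem : Mem) (p n : Nat) : Nat := countBelow (longP mem p) n

/-- **CNT** (sparse): `#{j < entries : lengths[j] ≠ 255} = sorted_entries`. -/
def CNT (mem : Mem) (lengths c : Nat) : Prop :=
  (usedCount mem lengths (Codebook.entries mem c).toNat : Int) = Codebook.sorted_entries mem c

/-- **CNT′** (dense): `#{j < entries : lengths[j] > 10 ∧ lengths[j] ≠ 255} = sorted_entries`. -/
def CNT' (mem : Mem) (lengths c : Nat) : Prop :=
  (longCount mem lengths (Codebook.entries mem c).toNat : Int) = Codebook.sorted_entries mem c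

/-- The counting predicates as propositions. -/
theorem usedP_iff (mem : Mem) (p j : Nat) : usedP mem p j = true ↔ mem.u8 (p + j) ≠ 255 := by
  unfold usedP
  exact decide_eq_true_iff

/-- The counting predicates as propositions. -/
theorem longP_iff (mem : Mem) (p j : Nat) : longP mem p j = true ↔ (11 ≤ mem.u8 (p + j) ∧ mem.u8 (p + j) ≤ 254) := by
  unfold longP
  exact decide_eq_true_iff

/-- `include_in_sort`'s test `len != NO_CODE && len > 10` on a byte is `11 ≤ len ≤ 254`. -/
theorem long_iff_include (b : Nat) (hb : b < 256) : (b ≠ 255 ∧ 10 < b) ↔ (11 ≤ b ∧ b ≤ 254) := by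
  omega

/-- Step of loop 3786, a present entry: `++total`. -/
theorem usedCount_succ_used {mem : Mem} {p j : Nat} (h : mem.u8 (p + j) ≠ 255) :
    usedCount mem p (j + 1) = usedCount mem p j + 1 :=
  countBelow_succ_true _ j ((usedP_iff mem p j).mpr h)

/-- Step of loop 3786, an absent entry (`lengths[j] = NO_CODE`). -/
theorem usedCount_succ_unused {mem : Mem} {p j : Nat} (h : mem.u8 (p + j) = 255) :
    usedCount mem p (j + 1) = usedCount mem p j := by
  apply countBelow_succ_false
  unfold usedP
  exact decide_eq_false (fun hne => hne h)

/-- Step of loop 3818, a counted entry. -/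
theorem longCount_succ_long {mem : Mem} {p j : Nat} (h : 11 ≤ mem.u8 (p + j) ∧ mem.u8 (p + j) ≤ 254) :
    longCount mem p (j + 1) = longCount mem p j + 1 :=
  countBelow_succ_true _ j ((longP_iff mem p j).mpr h)

/-- Step of loop 3818, an entry that is not counted. -/
theorem longCount_succ_short {mem : Mem} {p j : Nat} (h : ¬ (11 ≤ mem.u8 (p + j) ∧ mem.u8 (p + j) ≤ 254)) :
    longCount mem p (j + 1) = longCount mem p j := by
  apply countBelow_succ_false
  unfold longP
  exact decide_eq_false h

/-- `0 ≤ total ≤ j`. -/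
theorem usedCount_le (mem : Mem) (p n : Nat) : usedCount mem p n ≤ n := countBelow_le _ n

/-- `0 ≤ sorted_count ≤ j`. -/
theorem longCount_le (mem : Mem) (p n : Nat) : longCount mem p n ≤ n := countBelow_le _ n

/-- A long entry is a used entry: `sorted_count ≤ total`. -/
theorem longCount_le_usedCount (mem : Mem) (p n : Nat) : longCount mem p n ≤ usedCount mem p n := by
  apply countBelow_le_of_imp
  intro j _ hl
  have := (longP_iff mem p j).mp hl
  apply (usedP_iff mem p j).mpr
  omega

/-- **CNT at the store**: a used entry `i < n` is stored in slot `m = #{j < i : used}`, and `m < #{j < n : used}` (= `se`): the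
precondition `count < se` of `add_entry` in compute_codewords. -/
theorem usedCount_lt {mem : Mem} {p i n : Nat} (hi : i < n) (hu : mem.u8 (p + i) ≠ 255) :
    usedCount mem p i < usedCount mem p n :=
  countBelow_lt_of _ hi ((usedP_iff mem p i).mpr hu)

/-- **CNT′ at the store**: an included entry `i < n` is stored at `sorted_codewords[k]` with `k = #{j < i : included} < se`
(loop 1215 of compute_sorted_huffman). -/
theorem longCount_lt {mem : Mem} {p i n : Nat} (hi : i < n) (hl : 11 ≤ mem.u8 (p + i) ∧ mem.u8 (p + i) ≤ 254) :
    longCount mem p i < longCount mem p n :=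
  countBelow_lt_of _ hi ((longP_iff mem p i).mpr hl)

/-- The running count never passes the total. -/
theorem usedCount_mono (mem : Mem) (p : Nat) {i n : Nat} (h : i ≤ n) : usedCount mem p i ≤ usedCount mem p n :=
  countBelow_mono _ h

/-- The running count never passes the total. -/
theorem longCount_mono (mem : Mem) (p : Nat) {i n : Nat} (h : i ≤ n) : longCount mem p i ≤ longCount mem p n :=
  countBelow_mono _ h

/-- **Frame of the counts** ("`lengths` unchanged between the count and the use": STABLE): memories that agree on
`lengths[0 .. n)` give the same counts. -/
theorem counts_same {mem mem' : Mem} {p n : Nat} (hs : Mem.EqOn p (p + n) mem mem') (hb : p + n ≤ 2 ^ 64) :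
    usedCount mem' p n = usedCount mem p n ∧ longCount mem' p n = longCount mem p n := by
  constructor
  · apply countBelow_congr
    intro j hj
    unfold usedP
    rw [hs.u8 (p + j) (by omega) (by omega) hb]
  · apply countBelow_congr
    intro j hj
    unfold longP
    rw [hs.u8 (p + j) (by omega) (by omega) hb]

/-- **The counts survive the copy** of the sparse → dense conversion. -/
theorem counts_copy {mem mem' : Mem} {p q n : Nat} (hcp : ∀ j, j < n → mem'.u8 (q + j) = mem.u8 (p + j)) :
    usedCount mem' q n = usedCount mem p n ∧ longCount mem' q n = longCount mem p n := by
  constructor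
  · apply countBelow_congr
    intro j hj
    unfold usedP
    rw [hcp j hj]
  · apply countBelow_congr
    intro j hj
    unfold longP
    rw [hcp j hj]

/-- On the ordered path every length is in `[1, 31]`: every entry is used (`total` is not needed there, the book is dense). -/
theorem usedCount_eq_self {mem : Mem} {p n : Nat} (h : ∀ j, j < n → mem.u8 (p + j) ≠ 255) : usedCount mem p n = n := by
  apply countBelow_eq_self
  intro j hj
  exact (usedP_iff mem p j).mpr (h j hj)

/-! ### VAL: the symbols of a sparse book -/

/-- **VAL**: `∀ m < se: values[m] < entries` (`values` = the temp block P3 of `4·se` bytes; `uint32` words). Post of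
compute_codewords (each `values[count] = symbol` has `symbol < n`), pre of compute_sorted_huffman (`lengths[values[i]]`,
`sorted_values[x] = values[i]`). -/
def VAL (mem : Mem) (values se entries : Nat) : Prop :=
  ∀ m, m < se → mem.u32 (values + 4 * m) < entries

/-- Nothing stored yet. -/
theorem VAL.zero (mem : Mem) (values entries : Nat) : VAL mem values 0 entries := by
  intro m hm
  omega

/-- **Step** (`add_entry`'s `values[count] = symbol`, `count = m`): the words below `m` are kept, the new word is a symbol. -/
theorem VAL.store {mem mem' : Mem} {values m entries : Nat} (h : VAL mem values m entries)
    (hs : Mem.EqOn values (values + 4 * m) mem mem') (hb : values + 4 * m ≤ 2 ^ 64)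
    (hv : mem'.u32 (values + 4 * m) < entries) : VAL mem' values (m + 1) entries := by
  intro k hk
  by_cases e : k = m
  · rw [e]
    exact hv
  · rw [hs.u32 (values + 4 * k) (by omega) (by omega) hb]
    exact h k (by omega)

/-- **Frame of VAL.** -/
theorem VAL.same {mem mem' : Mem} {values se entries : Nat} (h : VAL mem values se entries)
    (hs : Mem.EqOn values (values + 4 * se) mem mem') (hb : values + 4 * se ≤ 2 ^ 64) : VAL mem' values se entries := by
  intro k hk
  rw [hs.u32 (values + 4 * k) (by omega) (by omega) hb]
  exact h k hk

/-- **USE of VAL**: `lengths[values[i]]` (0x10b435 in compute_sorted_huffman) is inside the `lengths` block of `entries` bytes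
(the temp block of a sparse book), for any spelling `a` of the address. -/
theorem VAL.site_lengths {Blk : Block → Prop} {Live : Nat → Prop} {mem : Mem} {values se entries lengths : Nat}
    (hL : BlkLive Blk Live) (h : VAL mem values se entries) (hB : Blk ⟨lengths, entries⟩) (i : Nat) (hi : i < se) {a : Nat}
    (ha : a = lengths + mem.u32 (values + 4 * i)) : Site Live a 1 := by
  subst ha
  have := h i hi
  apply Site.of_blk hL hB
  · simp only []
    omega
  · simp only []
    omega
  · omega

/-! ### ZV: K4c as a loop invariant -/

/-- **ZV**: `∀ x < se: 0 ≤ sv[x] < entries` for the table at `sv` (= `c->sorted_values` after the `++`). True at the entry of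
compute_sorted_huffman by FIX 7's zero fill, kept by both of its store sites; with the fields of `c` it IS K4c. -/
def ZV (mem : Mem) (sv se : Nat) (entries : Int) : Prop :=
  ∀ x, x < se → 0 ≤ mem.i32 (sv + 4 * x) ∧ mem.i32 (sv + 4 * x) < entries

/-- **ZV at the entry**: the words are 0 (FIX 7) and there is at least one entry (`se ≥ 1` and `se ≤ entries`). -/
theorem ZV.of_zeroFill {mem : Mem} {sv se : Nat} {entries : Int} (hz : ZeroFill mem sv (4 * se)) (he : 1 ≤ entries) :
    ZV mem sv se entries := by
  intro x hx
  rw [hz.i32 (sv + 4 * x) (by omega) (by omega)]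
  omega

/-- **Step, both store sites** (`c->sorted_values[x] = values[i]` with VAL; `= i` with `i < entries`): the other words are kept, the
new word is an entry number. -/
theorem ZV.store {mem mem' : Mem} {sv se x : Nat} {entries : Int} (h : ZV mem sv se entries) (hx : x < se)
    (hs1 : Mem.EqOn sv (sv + 4 * x) mem mem') (hs2 : Mem.EqOn (sv + 4 * x + 4) (sv + 4 * se) mem mem')
    (hb : sv + 4 * se ≤ 2 ^ 64) (hv : 0 ≤ mem'.i32 (sv + 4 * x) ∧ mem'.i32 (sv + 4 * x) < entries) :
    ZV mem' sv se entries := by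
  intro k hk
  by_cases e : k = x
  · rw [e]
    exact hv
  · by_cases hlt : k < x
    · rw [hs1.i32 (sv + 4 * k) (by omega) (by omega) (by omega)]
      exact h k hk
    · rw [hs2.i32 (sv + 4 * k) (by omega) (by omega) hb]
      exact h k hk

/-- **Frame of ZV.** -/
theorem ZV.same {mem mem' : Mem} {sv se : Nat} {entries : Int} (h : ZV mem sv se entries)
    (hs : Mem.EqOn sv (sv + 4 * se) mem mem') (hb : sv + 4 * se ≤ 2 ^ 64) : ZV mem' sv se entries := by
  intro k hk
  rw [hs.i32 (sv + 4 * k) (by omega) (by omega) hb]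
  exact h k hk

/-- **ZV with the fields of `c` is K4c.** -/
theorem K4c_iff_ZV (mem : Mem) (c : Nat) :
    Codebook.K4c mem c ↔
      ZV mem (Codebook.sorted_values mem c) (Codebook.sorted_entries mem c).toNat (Codebook.entries mem c) := by
  constructor
  · intro h x hx
    have := h x (by omega)
    simp only [Codebook.sorted_values_at] at this
    exact this
  · intro h x hx
    have := h x (by omega)
    simp only [Codebook.sorted_values_at]
    exact this

/-- K4c of a book without sorted tables (`se = 0`) is vacuous. -/
theorem Codebook.K4c.of_se_zero {mem : Mem} {c : Nat} (h : Codebook.sorted_entries mem c = 0) : Codebook.K4c mem c := by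
  intro x hx
  omega

/-! ### ZF and fresh books -/

/-- **ZF(i)**: every byte of `cb(k)`, `i ≤ k < count`, is 0 (`cbs` = `f->codebooks`, the block of `2120·count` bytes zeroed by the
memset of line 3745; nothing writes a book before its iteration). -/
def ZF (mem : Mem) (cbs count i : Nat) : Prop :=
  ZeroFill mem (cbs + Off.sizeof.Codebook * i) (Off.sizeof.Codebook * (count - i))

/-- Right after the memset: ZF(0). -/
theorem ZF.init {mem : Mem} {cbs count : Nat} (h : ZeroFill mem cbs (Off.sizeof.Codebook * count)) : ZF mem cbs count 0 := by
  unfold ZF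
  exact h.sub _ _ (by simp only [voff]; omega) (by simp only [voff]; omega)

/-- The iteration of book `i` starts from ZF(i) and hands ZF(i + 1) on: the later books are still all-zero. -/
theorem ZF.next {mem : Mem} {cbs count i : Nat} (h : ZF mem cbs count i) : ZF mem cbs count (i + 1) := by
  unfold ZF at *
  by_cases hi : i < count
  · apply h.sub
    · simp only [voff]
      omega
    · simp only [voff]
      omega
  · intro j hj
    have e : count - (i + 1) = 0 := by omega
    rw [e] at hj
    omega

/-- **A book not yet visited is zero-filled.** -/
theorem ZF.book {mem : Mem} {cbs count i : Nat} (h : ZF mem cbs count i) (k : Nat) (h1 : i ≤ k) (h2 : k < count) :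
    ZeroFill mem (cbs + Off.sizeof.Codebook * k) Off.sizeof.Codebook := by
  unfold ZF at h
  have e := elem_inside (size := Off.sizeof.Codebook) h2
  have e1 := Nat.mul_le_mul_left Off.sizeof.Codebook h1
  have e2 : Off.sizeof.Codebook * (count - i) = Off.sizeof.Codebook * count - Off.sizeof.Codebook * i :=
    Nat.mul_sub Off.sizeof.Codebook count i
  apply h.sub
  · omega
  · omega

/-- **Frame of ZF**: stores into book `i`, into `*f`, into any other block keep the later books zero. -/
theorem ZF.same {mem mem' : Mem} {cbs count i : Nat} (h : ZF mem cbs count i)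
    (hs : Mem.EqOn (cbs + Off.sizeof.Codebook * i) (cbs + Off.sizeof.Codebook * count) mem mem')
    (hi : i ≤ count) (hb : cbs + Off.sizeof.Codebook * count ≤ 2 ^ 64) : ZF mem' cbs count i := by
  unfold ZF at *
  have e1 := Nat.mul_le_mul_left Off.sizeof.Codebook hi
  have e2 : Off.sizeof.Codebook * (count - i) = Off.sizeof.Codebook * count - Off.sizeof.Codebook * i :=
    Nat.mul_sub Off.sizeof.Codebook count i
  apply h.same
  · apply Mem.EqOn.mono hs
    · exact Nat.le_refl _
    · omega
  · omega

namespace Codebook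

/-- **A fresh book**: every field of the `Codebook` at `c` still holds the 0 of the zero fill. ("c fresh at {…}" in the segment
assertions of start_decoder is the part of this that the code so far has not overwritten.) K4's `se = 0` case, K6's
`lookup_type = 0` case, and DeinitOK at SD.ERR (vorbis_deinit passes the five pointers to `setup_free`) rest on it. -/
structure Fresh (mem : Mem) (c : Nat) : Prop where
  dimensions : Codebook.dimensions mem c = 0
  entries : Codebook.entries mem c = 0
  codeword_lengths : Codebook.codeword_lengths mem c = 0
  value_bits : Codebook.value_bits mem c = 0
  lookup_type : Codebook.lookup_type mem c = 0
  sequence_p : Codebook.sequence_p mem c = 0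
  sparse : Codebook.sparse mem c = 0
  lookup_values : Codebook.lookup_values mem c = 0
  multiplicands : Codebook.multiplicands mem c = 0
  codewords : Codebook.codewords mem c = 0
  sorted_codewords : Codebook.sorted_codewords mem c = 0
  sorted_values : Codebook.sorted_values mem c = 0
  sorted_entries : Codebook.sorted_entries mem c = 0

/-- A zero-filled book is fresh. -/
theorem Fresh.of_zeroFill {mem : Mem} {c : Nat} (h : ZeroFill mem c Off.sizeof.Codebook) : Fresh mem c := by
  simp only [voff] at h
  constructor
  · simp only [vacc, voff]
    exact h.i32 _ (by omega) (by omega)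
  · simp only [vacc, voff]
    exact h.i32 _ (by omega) (by omega)
  · simp only [vacc, voff]
    exact h.u64 _ (by omega) (by omega)
  · simp only [vacc, voff]
    exact h.u8 _ (by omega) (by omega)
  · simp only [vacc, voff]
    exact h.u8 _ (by omega) (by omega)
  · simp only [vacc, voff]
    exact h.u8 _ (by omega) (by omega)
  · simp only [vacc, voff]
    exact h.u8 _ (by omega) (by omega)
  · simp only [vacc, voff]
    exact h.u32 _ (by omega) (by omega)
  · simp only [vacc, voff]
    exact h.u64 _ (by omega) (by omega)
  · simp only [vacc, voff]
    exact h.u64 _ (by omega) (by omega)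
  · simp only [vacc, voff]
    exact h.u64 _ (by omega) (by omega)
  · simp only [vacc, voff]
    exact h.u64 _ (by omega) (by omega)
  · simp only [vacc, voff]
    exact h.i32 _ (by omega) (by omega)

/-- Every `fast_huffman` entry of a zero-filled book is 0. -/
theorem fast_huffman_of_zeroFill {mem : Mem} {c : Nat} (h : ZeroFill mem c Off.sizeof.Codebook) (k : Nat) (hk : k < 1024) :
    Codebook.fast_huffman mem c k = 0 := by
  simp only [voff] at h
  simp only [vacc, voff]
  exact h.i16 _ (by omega) (by omega)

/-- **K4 of a book without sorted tables**: the two pointers still hold the NULL of the zero fill (`se = 0` is possible only for a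
dense book; nothing is allocated, compute_sorted_huffman is not called). -/
theorem K4.of_se_zero {Blk : Block → Prop} {mem : Mem} {c : Nat} (hse : Codebook.sorted_entries mem c = 0)
    (hsc : Codebook.sorted_codewords mem c = 0) (hsv : Codebook.sorted_values mem c = 0) : K4 Blk mem c := by
  refine ⟨?_, ?_, ?_, ?_⟩
  · intro h
    omega
  · intro h
    omega
  · intro h
    omega
  · intro _
    exact ⟨hsc, hsv⟩

/-- **K6 of a book with `lookup_type = 0`** (exit of segment C9): `multiplicands` still holds the NULL of the zero fill. -/
theorem K6.of_type_zero {Blk : Block → Prop} {mem : Mem} {c : Nat} (ht : Codebook.lookup_type mem c = 0)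
    (hm : Codebook.multiplicands mem c = 0) : K6 Blk mem c := by
  refine ⟨Or.inl ht, ?_, ?_, ?_⟩
  · intro h
    omega
  · intro h
    omega
  · intro _
    exact hm

/-- **K6 of a book with `lookup_type = 2`** (exits of segments C13, C14): the product bound of FIX 3 for `entries`, and an
allocated block of `n ≥ 4·N(c)·dimensions` bytes (`n` = what was allocated: `4·N·D` for an expanded type 1,
`4·lookup_values = 4·E·D` for type 2). -/
theorem K6.of_type_two {Blk : Block → Prop} {mem : Mem} {c n : Nat} (h2 : K2 mem c) (h1 : K1 mem c)
    (ht : Codebook.lookup_type mem c = 2)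
    (hp : Codebook.entries mem c * Codebook.dimensions mem c ≤ 0x1FFFFFFF)
    (hblk : Blk ⟨Codebook.multiplicands mem c, n⟩)
    (hn : 4 * ((N mem c).toNat * (Codebook.dimensions mem c).toNat) ≤ n) : K6 Blk mem c := by
  refine ⟨Or.inr ht, ?_, ?_, ?_⟩
  · intro _
    have hN := N_le_entries h2
    have hN0 := N_nonneg h1 h2
    have hd := h1.dim_pos
    have := Int.mul_le_mul_of_nonneg_right hN (by omega : 0 ≤ Codebook.dimensions mem c)
    omega
  · intro _
    exact ⟨n, hn, hblk⟩
  · intro h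
    omega

/-- **K3t: the shape compute_codewords, add_entry and compute_sorted_huffman take** (D-20). A dense book: K3n. A sparse book under
construction: `codeword_lengths` is its final block of EXACTLY `se` bytes, `codewords` is the TEMP block P2 of EXACTLY `4·se`
bytes (`codewords = NULL`, K3s, is true only after line 3869). `Blk` here is a block predicate that holds of
the temp blocks of the iteration too (`Blk.or` of the setup blocks and the temp blocks). -/
structure K3t (Blk : Block → Prop) (mem : Mem) (c : Nat) : Prop where
  /-- the dense shape is already the final one -/
  dense : Codebook.sparse mem c = 0 → K3n Blk mem c
  /-- `c->codeword_lengths = setup_malloc(f, se)` -/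
  sparse_lengths : Codebook.sparse mem c = 1 →
    Blk ⟨Codebook.codeword_lengths mem c, (Codebook.sorted_entries mem c).toNat⟩
  /-- `c->codewords = setup_temp_malloc(f, 4·se)` -/
  sparse_codewords : Codebook.sparse mem c = 1 →
    Blk ⟨Codebook.codewords mem c, 4 * (Codebook.sorted_entries mem c).toNat⟩

/-- USE of K3t: `c->codewords[i]`, `i < N(c)` (add_entry's stores; the loads of loops 1215 / 1220 / 1233 of
compute_sorted_huffman and of compute_accelerated_huffman's dense arm). -/
theorem K3t.site_codewords {Blk : Block → Prop} {Live : Nat → Prop} {mem : Mem} {c : Nat} (hL : BlkLive Blk Live)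
    (h : K3t Blk mem c) (h2 : K2 mem c) (i : Nat) (hi : (i : Int) < N mem c) {a : Nat}
    (ha : a = Codebook.codewords_at mem c i) : Site Live a 4 := by
  subst ha
  by_cases hs : Codebook.sparse mem c = 0
  · rw [N_dense hs] at hi
    apply Site.of_blk hL (h.dense hs).codewords
    · simp only [Codebook.codewords_at]
      omega
    · simp only [Codebook.codewords_at]
      omega
    · omega
  · rw [N_sparse hs] at hi
    apply Site.of_blk hL (h.sparse_codewords (h2.sparse_one hs))
    · simp only [Codebook.codewords_at]
      omega
    · simp only [Codebook.codewords_at]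
      omega
    · omega

/-- USE of K3t: `c->codeword_lengths[i]`, `i < N(c)`. -/
theorem K3t.site_lengths {Blk : Block → Prop} {Live : Nat → Prop} {mem : Mem} {c : Nat} (hL : BlkLive Blk Live)
    (h : K3t Blk mem c) (h2 : K2 mem c) (i : Nat) (hi : (i : Int) < N mem c) {a : Nat}
    (ha : a = Codebook.codeword_lengths_at mem c i) : Site Live a 1 := by
  subst ha
  by_cases hs : Codebook.sparse mem c = 0
  · rw [N_dense hs] at hi
    apply Site.of_blk hL (h.dense hs).lengths
    · simp only [Codebook.codeword_lengths_at]
      omega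
    · simp only [Codebook.codeword_lengths_at]
      omega
    · omega
  · rw [N_sparse hs] at hi
    apply Site.of_blk hL (h.sparse_lengths (h2.sparse_one hs))
    · simp only [Codebook.codeword_lengths_at]
      omega
    · simp only [Codebook.codeword_lengths_at]
      omega
    · omega

/-- The final shape is a transient shape (a finished dense book; K3t is only ever WEAKER than K3 for a dense book). -/
theorem K3t.of_dense {Blk : Block → Prop} {mem : Mem} {c : Nat} (h : K3n Blk mem c) (hs : Codebook.sparse mem c = 0) :
    K3t Blk mem c := by
  refine ⟨fun _ => h, ?_, ?_⟩
  · intro h1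
    omega
  · intro h1
    omega

/-- The block predicate changes, the memory does not (a temp block was allocated or freed while the book is built): the blocks
K3t mentions — based at `codeword_lengths` and at `codewords` — are still allocated. -/
theorem K3t.reblk {Blk Blk' : Block → Prop} {mem : Mem} {c : Nat} (h : K3t Blk mem c)
    (hB : ∀ B, (B.base = Codebook.codeword_lengths mem c ∨ B.base = Codebook.codewords mem c) → Blk B → Blk' B) :
    K3t Blk' mem c := by
  refine ⟨?_, ?_, ?_⟩
  · intro hs
    have k := h.dense hs
    exact ⟨hB _ (Or.inl rfl) k.lengths, hB _ (Or.inr rfl) k.codewords⟩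
  · intro hs
    exact hB _ (Or.inl rfl) (h.sparse_lengths hs)
  · intro hs
    exact hB _ (Or.inr rfl) (h.sparse_codewords hs)

/-- **From the transient to the final shape** (line 3869, `c->codewords = NULL` after the three frees): the fields of `c` other than
`codewords` read the same, `codewords` now reads NULL; the blocks that stay (`hB`: based at `codeword_lengths`, and for a dense
book at `codewords`; NOT the temp block behind the old `codewords` of a sparse book) are allocated in the new block predicate
`Blk'` (the one without the freed temp blocks). -/
theorem K3.of_K3t {Blk Blk' : Block → Prop} {mem mem' : Mem} {c : Nat} (h : K3t Blk mem c)
    (hsp : Codebook.sparse mem' c = Codebook.sparse mem c)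
    (hcl : Codebook.codeword_lengths mem' c = Codebook.codeword_lengths mem c)
    (hen : Codebook.entries mem' c = Codebook.entries mem c)
    (hse : Codebook.sorted_entries mem' c = Codebook.sorted_entries mem c)
    (hcw : (Codebook.sparse mem c = 0 → Codebook.codewords mem' c = Codebook.codewords mem c) ∧
      (Codebook.sparse mem c = 1 → Codebook.codewords mem' c = 0))
    (hB : ∀ B, (B.base = Codebook.codeword_lengths mem c ∨
        (Codebook.sparse mem c = 0 ∧ B.base = Codebook.codewords mem c)) → Blk B → Blk' B) : K3 Blk' mem' c := by
  refine ⟨?_, ?_⟩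
  · intro hs
    rw [hsp] at hs
    have k := h.dense hs
    refine ⟨?_, ?_⟩
    · rw [hcl, hen]
      exact hB _ (Or.inl rfl) k.lengths
    · rw [hcw.1 hs, hen]
      exact hB _ (Or.inr ⟨hs, rfl⟩) k.codewords
  · intro hs
    rw [hsp] at hs
    refine ⟨?_, hcw.2 hs⟩
    rw [hcl, hse]
    exact hB _ (Or.inl rfl) (h.sparse_lengths hs)

/-! ### K5 under construction (compute_accelerated_huffman) -/

/-- The first loop, `for (i = 0; i < FAST_HUFFMAN_TABLE_SIZE; ++i) c->fast_huffman[i] = -1`: the entries below `i` are −1. -/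
def FHInit (mem : Mem) (c i : Nat) : Prop :=
  ∀ k, k < i → Codebook.fast_huffman mem c k = -1

/-- Nothing stored yet. -/
theorem FHInit.zero (mem : Mem) (c : Nat) : FHInit mem c 0 := by
  intro k hk
  omega

/-- Step of the first loop: the entries below `i` are kept, entry `i` is now −1. -/
theorem FHInit.store {mem mem' : Mem} {c i : Nat} (h : FHInit mem c i)
    (hk : ∀ k, k < i → Codebook.fast_huffman mem' c k = Codebook.fast_huffman mem c k)
    (hv : Codebook.fast_huffman mem' c i = -1) : FHInit mem' c (i + 1) := by
  intro k hlt
  by_cases e : k = i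
  · rw [e]
    exact hv
  · rw [hk k (by omega)]
    exact h k (by omega)

/-- After the first loop every entry is −1: `K5b` with the bound 0, the start of the second loop (`i = 0`). -/
theorem K5b.init {mem : Mem} {c : Nat} (h : FHInit mem c 1024) : K5b mem c 0 := by
  intro k hk
  exact Or.inl (h k hk)

/-- **Step of the second loop** (`c->fast_huffman[z] = i` under `z < 1024`, `0 ≤ i < len ≤ 32767` stored as an `int16`): the other
entries are kept, entry `z` is now `v < b`. (Round `i` of the loop: `K5b mem c i` → store `v = i` → `K5b mem' c (i + 1)`, by
`K5b.mono` first.) -/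
theorem K5b.store {mem mem' : Mem} {c z : Nat} {b v : Int} (h : K5b mem c b)
    (hk : ∀ k, k < 1024 → k ≠ z → Codebook.fast_huffman mem' c k = Codebook.fast_huffman mem c k)
    (hv : Codebook.fast_huffman mem' c z = v) (h0 : 0 ≤ v) (hb : v < b) : K5b mem' c b := by
  intro k hlt
  by_cases e : k = z
  · rw [e, hv]
    exact Or.inr ⟨h0, hb⟩
  · rw [hk k hlt e]
    exact h k hlt

/-- A K5 table of a book with `N(c) = 0` has no index at all: every entry is −1 (the fast path is never taken). -/
theorem K5.all_neg_of_N_zero {mem : Mem} {c : Nat} (h : K5 mem c) (hN : N mem c = 0) (k : Nat) (hk : k < 1024) :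
    Codebook.fast_huffman mem c k = -1 := by
  cases h k hk with
  | inl h1 => exact h1
  | inr h2 => omega

end Codebook

/-! ### The loop invariant of the codebook loop -/

/-- **`BooksOK f i`**: `CodebookOK cb(b)` for every `b < i` — the `GLB(i)` part of the invariant of
`for (i = 0; i < f->codebook_count; ++i)` (point SD.4); with `i = codebook_count` it is the clause
`∀ i < codebook_count, CodebookOK cb(i)` of `VorbisOK`. -/
def BooksOK (Blk : Block → Prop) (mem : Mem) (f i : Nat) : Prop :=
  ∀ b, b < i → CodebookOK Blk mem (stb_vorbis.codebooks_at mem f b)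

/-- Before the first iteration. -/
theorem BooksOK.zero (Blk : Block → Prop) (mem : Mem) (f : Nat) : BooksOK Blk mem f 0 := by
  intro b hb
  omega

/-- **The step of the codebook loop** (segment C10, `++i`): the books below `i` are fine and book `i` has just been finished. -/
theorem BooksOK.succ {Blk : Block → Prop} {mem : Mem} {f i : Nat} (h : BooksOK Blk mem f i)
    (hi : CodebookOK Blk mem (stb_vorbis.codebooks_at mem f i)) : BooksOK Blk mem f (i + 1) := by
  intro b hb
  by_cases e : b = i
  · rw [e]
    exact hi
  · exact h b (by omega)

/-- Fewer books. -/
theorem BooksOK.mono {Blk : Block → Prop} {mem : Mem} {f i j : Nat} (h : BooksOK Blk mem f i) (hj : j ≤ i) :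
    BooksOK Blk mem f j :=
  fun b hb => h b (by omega)

/-- **USE: a book index `b < codebook_count` of a finished decoder**: `cb(b)` is `CodebookOK` and lies inside the codebooks block
(allocated: `h0.F2`). This is what a decode-time function starts from when it has computed `f->codebooks + b` (`b` = a classbook,
a masterbook, a subclass book ≥ 0, a residue book ≥ 0): `CodebookOK`, and — with `hB := h0.F2` — the `hin` of the USE lemmas of
Vorbis/Codebook/Book.lean. -/
theorem BooksOK.book {Blk : Block → Prop} {mem : Mem} {f : Nat} (h : BooksOK Blk mem f (stb_vorbis.codebook_count mem f).toNat)
    (h0 : CodebooksOK Blk mem f) (b : Nat) (hb : (b : Int) < stb_vorbis.codebook_count mem f) :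
    CodebookOK Blk mem (stb_vorbis.codebooks_at mem f b) ∧
      (codebooksBlock mem f).contains (stb_vorbis.codebooks_at mem f b) Off.sizeof.Codebook :=
  ⟨h b (by omega), h0.cb_in b hb⟩

/-- The blocks that `BooksOK … i` owns: those of the books below `i`. -/
inductive BooksOK.Owns (mem : Mem) (f i : Nat) : Block → Prop
  /-- a block of book `b < i` -/
  | book (b : Nat) (hb : b < i) (B : Block) (hB : CodebookOK.Owns mem (stb_vorbis.codebooks_at mem f b) B) :
      BooksOK.Owns mem f i B

/-- **The two-address frame lemma of `BooksOK`**: `codebooks` of `(mem', f)` has the value of `(mem, p)`, every finished book's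
struct and `sorted_values` block are kept, the blocks the finished books own are still allocated. -/
theorem BooksOK.transfer {Blk Blk' : Block → Prop} {mem mem' : Mem} {p f i : Nat} (h : BooksOK Blk mem p i)
    (hp : stb_vorbis.codebooks mem' f = stb_vorbis.codebooks mem p)
    (hs : ∀ b, b < i → (Codebook.block (stb_vorbis.codebooks_at mem p b)).Kept mem mem')
    (hv : ∀ b, b < i → 1 ≤ Codebook.sorted_entries mem (stb_vorbis.codebooks_at mem p b) →
      (Codebook.svBlock mem (stb_vorbis.codebooks_at mem p b)).Kept mem mem')
    (hB : ∀ B, BooksOK.Owns mem p i B → Blk B → Blk' B) : BooksOK Blk' mem' f i := by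
  intro b hb
  have e : stb_vorbis.codebooks_at mem' f b = stb_vorbis.codebooks_at mem p b := by
    simp only [stb_vorbis.codebooks_at, hp]
  rw [e]
  exact (h b hb).transfer (hs b hb) (hv b hb) (fun B hO => hB B (BooksOK.Owns.book b hb B hO))

/-- **Frame of `BooksOK`**: `f->codebooks` reads the same, and every finished book's struct and `sorted_values` block are kept. -/
theorem BooksOK.frame {Blk : Block → Prop} {mem mem' : Mem} {f i : Nat} (h : BooksOK Blk mem f i)
    (hp : stb_vorbis.codebooks mem' f = stb_vorbis.codebooks mem f)
    (hs : ∀ b, b < i → (Codebook.block (stb_vorbis.codebooks_at mem f b)).Kept mem mem')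
    (hv : ∀ b, b < i → 1 ≤ Codebook.sorted_entries mem (stb_vorbis.codebooks_at mem f b) →
      (Codebook.svBlock mem (stb_vorbis.codebooks_at mem f b)).Kept mem mem') :
    BooksOK Blk mem' f i :=
  h.transfer hp hs hv (fun _ _ hb => hb)

/-- **The block predicate changes, the memory does not** (a block was allocated while the loop runs; a temp block of the
iteration was freed): the blocks of the finished books are still allocated. -/
theorem BooksOK.reblk {Blk Blk' : Block → Prop} {mem : Mem} {f i : Nat} (h : BooksOK Blk mem f i)
    (hB : ∀ B, BooksOK.Owns mem f i B → Blk B → Blk' B) : BooksOK Blk' mem f i :=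
  fun b hb => (h b hb).reblk (fun B hO => hB B (BooksOK.Owns.book b hb B hO))

/-- **The coarse frame of `BooksOK`**: every allocated block is kept (the memory changed outside the allocated blocks) and no
block of `Blk` was freed. `CodebooksOK` says where the books are. -/
theorem BooksOK.carry {Blk Blk' : Block → Prop} {mem mem' : Mem} {f i : Nat} (h : BooksOK Blk mem f i)
    (h0 : CodebooksOK Blk mem f) (hi : (i : Int) ≤ stb_vorbis.codebook_count mem f)
    (hp : stb_vorbis.codebooks mem' f = stb_vorbis.codebooks mem f) (hall : AllKept Blk mem mem')
    (hsub : ∀ B, Blk B → Blk' B) : BooksOK Blk' mem' f i := by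
  apply h.transfer hp
  · intro b hb
    exact h0.cb_kept (hall _ h0.F2) b (by omega)
  · intro b hb hse
    exact hall _ ((h b hb).K4.sv hse)
  · intro B _ hblk
    exact hsub B hblk

/-! ### The groups of this unit, as the top-level invariant plugs them in (Vorbis/State.lean) -/

/-- `HeaderOK` as a `Group` (it has no SHAPE clause: the block predicate is ignored). -/
def HeaderGroup : Group := fun _ mem f => HeaderOK mem f

/-- **`HeaderOK` follows the object and has the coarse frame.** -/
theorem HeaderGroup.good : Group.Good HeaderGroup := by
  constructor
  · intro Blk Blk' mem mem' p f hm h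
    exact HeaderOK.transfer h (hm.objEq (by decide))
  · intro Blk Blk' mem mem' f hall _ hob h
    exact HeaderOK.transfer h (ObjEq.of_kept_obj (hall _ hob) (by decide))

/-- **`CommentsOK` follows the object and has the coarse frame.** -/
theorem CommentsOK.good : Group.Good CommentsOK := by
  constructor
  · intro Blk Blk' mem mem' p f hm h
    apply CommentsOK.transfer h (hm.objEq (by decide))
    · intro B hR
      exact hm.kept (h.reads_blk hR)
    · intro B _ hb
      exact hm.sub B hb
  · intro Blk Blk' mem mem' f hall hsub hob h
    apply CommentsOK.transfer h (ObjEq.of_kept_obj (hall _ hob) (by decide))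
    · intro B hR
      exact hall B (h.reads_blk hR)
    · intro B _ hb
      exact hsub B hb

/-- **CB0 follows the object and has the coarse frame.** -/
theorem CB0.good : Group.Good CB0 := by
  constructor
  · intro Blk Blk' mem mem' p f hm h
    apply CB0.transfer h (hm.objEq (by decide))
    intro B _ hb
    exact hm.sub B hb
  · intro Blk Blk' mem mem' f hall hsub hob h
    apply CB0.transfer h (ObjEq.of_kept_obj (hall _ hob) (by decide))
    intro B _ hb
    exact hsub B hb

/-- **`CodebooksOK` follows the object and has the coarse frame.** -/
theorem CodebooksOK.good : Group.Good CodebooksOK := by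
  constructor
  · intro Blk Blk' mem mem' p f hm h
    apply CodebooksOK.transfer h (hm.objEq (by decide))
    intro B _ hb
    exact hm.sub B hb
  · intro Blk Blk' mem mem' f hall hsub hob h
    apply CodebooksOK.transfer h (ObjEq.of_kept_obj (hall _ hob) (by decide))
    intro B _ hb
    exact hsub B hb

end Vorbis
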